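-- pv_equiv track=rewrite | github.com/reinator/pimba | dockerfiles/plwb/placement-workbench-master/reftree-pipe/scripts/trim_ends.py | has_at_least_n_nongap
-- ===== SOURCE A (Python) =====
-- from collections import Counter
--
-- def has_at_least_n_nongap( column, n, datatype ):
-- 	gap_chars = "X*-?." if datatype == 'aa' else "NOX.-?"
-- 	counts = Counter( map(str.upper, column) )
--
-- 	# tally up the counts of all gap chars
-- 	num_gap_chars = 0
-- 	for g in gap_chars:
-- 		if g in counts.keys():
-- 			num_gap_chars = num_gap_chars + counts[g]
--
-- 	return (len(column) - num_gap_chars) >= n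
-- ===== SOURCE B (Python) =====
-- def has_at_least_n_nongap(column, n, datatype):
--     gap_set = set("X*-?." if datatype == 'aa' else "NOX.-?")
--     return sum(1 for c in column if c.upper() not in gap_set) >= n
-- ===== Notes on version B (the rewrite author's own statement) =====
-- stated objective: simpler
-- what changed: Drops the Counter frequency table and the loop over gap characters; B counts the non-gap characters directly in one filtering pass over the column and compares that count with n.
import Mathlib
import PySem

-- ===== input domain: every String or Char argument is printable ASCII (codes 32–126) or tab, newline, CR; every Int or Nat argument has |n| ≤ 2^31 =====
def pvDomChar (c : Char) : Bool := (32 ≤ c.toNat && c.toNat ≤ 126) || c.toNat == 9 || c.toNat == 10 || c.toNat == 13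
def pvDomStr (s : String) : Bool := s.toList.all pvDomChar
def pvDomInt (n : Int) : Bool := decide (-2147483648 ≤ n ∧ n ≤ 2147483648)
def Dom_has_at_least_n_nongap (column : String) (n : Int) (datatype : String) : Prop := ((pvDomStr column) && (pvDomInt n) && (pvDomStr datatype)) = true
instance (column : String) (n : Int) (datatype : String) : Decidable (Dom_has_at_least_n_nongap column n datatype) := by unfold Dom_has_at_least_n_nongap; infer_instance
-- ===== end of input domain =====

-- B drops A's Counter table and gap-character loop: it counts the non-gap characters directly in one filtering pass (simpler decomposition, same cost).


-- ===== PORT A =====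
def has_at_least_n_nongap (column : String) (n : Int) (datatype : String) : Bool :=
  let gap_chars : String := if datatype = "aa" then "X*-?." else "NOX.-?"
  let counts : PySem.Dict Char Int :=
    PySem.Dict.counter (column.toList.map PySem.Chars.upperChar)
  let num_gap_chars : Int :=
    gap_chars.toList.foldl
      (fun acc g => if counts.contains g then acc + counts.getD g 0 else acc) 0
  decide (((column.toList.length : Int) - num_gap_chars) ≥ n)

-- ===== PORT B =====
def has_at_least_n_nongap_alt (column : String) (n : Int) (datatype : String) : Bool :=
  let gap_set : PySem.Set Char :=
    PySem.Set.ofList (if datatype = "aa" then "X*-?." else "NOX.-?").toList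
  let cnt : Int :=
    ((column.toList.filter (fun c => !(gap_set.contains (PySem.Chars.upperChar c)))).length : Int)
  decide (cnt ≥ n)

-- ===== PRECONDITION & SPEC =====
def Spec_has_at_least_n_nongap (column : String) (n : Int) (datatype : String) (out : Bool) : Prop := out = has_at_least_n_nongap_alt column n datatype
instance (column : String) (n : Int) (datatype : String) (out : Bool) : Decidable (Spec_has_at_least_n_nongap column n datatype out) := by unfold Spec_has_at_least_n_nongap; infer_instance

-- ===== CLAIM (what is proved, stated in full; the proofs are below) =====
def Claim_equal_has_at_least_n_nongap : Prop := ∀ (column : String) (n : Int) (datatype : String), Dom_has_at_least_n_nongap column n datatype → Spec_has_at_least_n_nongap column n datatype (has_at_least_n_nongap column n datatype)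

-- ===== LEMMAS AND PROOFS =====

-- A's gap loop sums, over the gap characters, the Counter's entry = count in the mapped column.
theorem gapFoldl_eq_sum (gs ys : List Char) (a : Int) :
    gs.foldl
      (fun acc g => if (PySem.Dict.counter ys).contains g
                    then acc + (PySem.Dict.counter ys).getD g 0 else acc) a
    = a + (gs.map (fun g => (ys.count g : Int))).sum := by
  have hfun : ∀ (acc : Int) (g : Char),
      (if (PySem.Dict.counter ys).contains g
       then acc + (PySem.Dict.counter ys).getD g 0 else acc)
      = acc + (ys.count g : Int) := by
    intro acc g
    rw [PySem.Dict.contains_counter, PySem.Dict.getD_counter]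
    by_cases h : ys.contains g = true
    · rw [if_pos h]
    · have hz : ys.count g = 0 := by
        simp only [List.contains_eq_mem, decide_eq_true_eq] at h
        exact List.count_eq_zero.mpr h
      rw [if_neg h, hz]
      simp
  induction gs generalizing a with
  | nil => simp
  | cons g gs ih =>
    rw [List.foldl_cons, hfun, ih]
    simp [add_assoc]

-- The indicator sum over a duplicate-free list is a membership test.
theorem sum_indicator (gs : List Char) (hnd : gs.Nodup) (c : Char) :
    (gs.map (fun g => (if g = c then (1 : Int) else 0))).sum
      = if gs.contains c then 1 else 0 := by
  induction gs with
  | nil => simp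
  | cons x xs ih =>
    obtain ⟨hx, hnd'⟩ := List.nodup_cons.mp hnd
    by_cases h : x = c
    · subst h
      have hc : xs.contains x = false := by simpa using hx
      simp [ih hnd', hx]
    · simp [h, ih hnd', Ne.symm h]

-- Summing per-gap-character counts over a duplicate-free gap list counts, elementwise,
-- the characters of ys that lie in the gap list.
theorem sum_counts_eq_filter_length (gs : List Char) (hnd : gs.Nodup) (ys : List Char) :
    (gs.map (fun g => (ys.count g : Int))).sum
      = ((ys.filter (fun c => gs.contains c)).length : Int) := by
  induction ys with
  | nil => simp
  | cons c t ih =>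
    have h1 : (gs.map (fun g => ((c :: t).count g : Int))).sum
        = (gs.map (fun g => (t.count g : Int) + (if g = c then (1 : Int) else 0))).sum := by
      refine congrArg List.sum (List.map_congr_left ?_)
      intro g _
      by_cases h : g = c
      · subst h
        simp
      · simp [h, Ne.symm h]
    rw [h1, List.sum_map_add, ih, sum_indicator gs hnd c]
    by_cases hc : c ∈ gs
    · simp [hc]
    · simp [hc]

-- ===== VERDICT (by name: the statement is the Claim_ definition above) =====
theorem has_at_least_n_nongap_spec : Claim_equal_has_at_least_n_nongap := by
  intro column n datatype _
  unfold Spec_has_at_least_n_nongap has_at_least_n_nongap has_at_least_n_nongap_alt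
  set gapStr : String := if datatype = "aa" then "X*-?." else "NOX.-?" with hgap
  have hnd : gapStr.toList.Nodup := by
    rw [hgap]; split_ifs <;> decide
  have hset : PySem.Set.ofList gapStr.toList = gapStr.toList := by
    rw [hgap]; split_ifs <;> decide
  simp only [hset, PySem.Set.contains]
  rw [gapFoldl_eq_sum, sum_counts_eq_filter_length _ hnd, zero_add]
  have hfm : (column.toList.map PySem.Chars.upperChar).filter (fun c => gapStr.toList.contains c)
      = (column.toList.filter (fun c => gapStr.toList.contains (PySem.Chars.upperChar c))).map PySem.Chars.upperChar := by
    rw [List.filter_map]; rfl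
  have hsplit :
      (column.toList.filter (fun c => gapStr.toList.contains (PySem.Chars.upperChar c))).length
      + (column.toList.filter (fun c => !(gapStr.toList.contains (PySem.Chars.upperChar c)))).length
      = column.toList.length := (List.length_eq_length_filter_add _).symm
  rw [hfm, List.length_map]
  rw [decide_eq_decide]
  omega
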